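-- pv_equiv track=rewrite | github.com/yaromochka/YandexContests | Algorithms 5/Lection 1/Question 5/main.py | count_profit
-- ===== SOURCE A (Python) =====
-- def count_profit(n: int, k: int, d: int) -> str:
--     for i in range(10):
--         num = (n * 10 + i)
--         if num % k == 0:
--             break
--     else:
--         return "-1"
--     return str(num) + "0" * (d - 1)
-- ===== SOURCE B (Python) =====
-- def count_profit(n: int, k: int, d: int) -> str:
--     i = (-(n * 10)) % abs(k)
--     if i < 10:
--         return str(n * 10 + i) + "0" * (d - 1)
--     return "-1"
-- ===== Notes on version B (the rewrite author's own statement) =====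
-- stated objective: simpler
-- what changed: Replaces A's range(10) search loop by computing the needed digit directly as (-(n*10)) % abs(k) in O(1) closed form.
import Mathlib
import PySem

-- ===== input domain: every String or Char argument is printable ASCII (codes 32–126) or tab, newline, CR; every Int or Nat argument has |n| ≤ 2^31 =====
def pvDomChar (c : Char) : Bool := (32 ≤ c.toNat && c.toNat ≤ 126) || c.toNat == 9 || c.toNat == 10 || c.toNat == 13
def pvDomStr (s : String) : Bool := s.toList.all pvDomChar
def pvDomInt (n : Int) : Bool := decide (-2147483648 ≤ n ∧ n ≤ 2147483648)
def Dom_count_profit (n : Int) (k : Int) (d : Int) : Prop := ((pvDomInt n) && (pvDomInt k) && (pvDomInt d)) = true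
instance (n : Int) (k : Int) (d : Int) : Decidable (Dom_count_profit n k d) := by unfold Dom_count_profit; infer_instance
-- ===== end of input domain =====

-- B replaces A's range(10) search loop by computing the digit directly as (-(n*10)) % abs(k); same values wherever A returns (k ≠ 0).

-- ===== PORT A =====
-- the for-loop with break/else: first i in range(10) with (n*10+i) % k == 0
def countLoopA (n : Int) (k : Int) : List Int → Option Int
  | [] => none
  | i :: rest => if PySem.Int.mod (n * 10 + i) k == 0 then some i else countLoopA n k rest

def count_profit (n : Int) (k : Int) (d : Int) : String :=
  match countLoopA n k (PySem.List.pyRange 0 10 1) with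
  | none => "-1"
  | some i => PySem.Int.toStr (n * 10 + i) ++ String.mk (PySem.List.pyRepeat ['0'] (d - 1))

-- ===== PORT B =====
def count_profit_alt (n : Int) (k : Int) (d : Int) : String :=
  let i := PySem.Int.mod (-(n * 10)) |k|
  if i < 10 then PySem.Int.toStr (n * 10 + i) ++ String.mk (PySem.List.pyRepeat ['0'] (d - 1))
  else "-1"

-- ===== PRECONDITION & SPEC =====
-- Python raises ZeroDivisionError (in both A and B) when k == 0
def Pre_count_profit (n : Int) (k : Int) (d : Int) : Prop := k ≠ 0
instance (n : Int) (k : Int) (d : Int) : Decidable (Pre_count_profit n k d) := by unfold Pre_count_profit; infer_instance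
def pvWitness_count_profit : Int × Int × Int := (12, 7, 3)

def Spec_count_profit (n : Int) (k : Int) (d : Int) (out : String) : Prop := out = count_profit_alt n k d
instance (n : Int) (k : Int) (d : Int) (out : String) : Decidable (Spec_count_profit n k d out) := by unfold Spec_count_profit; infer_instance

-- ===== CLAIM (what is proved, stated in full; the proofs are below) =====
def Claim_equal_count_profit : Prop := ∀ (n : Int) (k : Int) (d : Int), Dom_count_profit n k d → Pre_count_profit n k d → Spec_count_profit n k d (count_profit n k d)

-- ===== LEMMAS AND PROOFS =====

-- The loop over range(a,10) finds exactly i0 (the unique residue in [0,m)) when i0 < 10, else nothing.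
theorem countLoopA_eq (n k m i0 : Int) (hm : 0 < m) (hi0lt : i0 < m)
    (hcond : ∀ i : Int, ((PySem.Int.mod (n * 10 + i) k == 0) = true ↔ m ∣ (n * 10 + i)))
    (hd0 : m ∣ (n * 10 + i0)) :
    ∀ fuel : Nat, ∀ a : Int, (10 - a).toNat ≤ fuel → 0 ≤ a → a ≤ i0 →
      countLoopA n k (PySem.List.pyRange a 10 1) = if i0 < 10 then some i0 else none := by
  intro fuel
  induction fuel with
  | zero =>
    intro a hf ha hai
    have hb : (10 : Int) ≤ a := by omega
    rw [PySem.List.pyRange_one_eq_nil hb]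
    rw [if_neg (by omega)]
    rfl
  | succ f ih =>
    intro a hf ha hai
    by_cases hb : (10 : Int) ≤ a
    · rw [PySem.List.pyRange_one_eq_nil hb]
      rw [if_neg (by omega)]
      rfl
    · push_neg at hb
      rw [PySem.List.pyRange_one_cons (by omega : a < 10)]
      show (if PySem.Int.mod (n * 10 + a) k == 0 then some a else countLoopA n k (PySem.List.pyRange (a + 1) 10 1)) = _
      by_cases heq : a = i0
      · subst heq
        rw [if_pos (by rw [hcond]; exact hd0)]
        rw [if_pos hb]
      · have hfalse : ¬ ((PySem.Int.mod (n * 10 + a) k == 0) = true) := by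
          rw [hcond]
          intro hdv
          have hdiff : m ∣ (i0 - a) := by
            have := Int.dvd_sub hd0 hdv
            simpa using this
          obtain ⟨t, ht⟩ := hdiff
          have h1 : t < 1 := by nlinarith
          have h2 : 0 < t := by
            rcases le_or_gt t 0 with h' | h'
            · exfalso
              have hmt : m * t ≤ 0 := mul_nonpos_of_nonneg_of_nonpos hm.le h'
              have hlt : a < i0 := lt_of_le_of_ne hai heq
              linarith
            · exact h'
          omega
        rw [if_neg hfalse]
        exact ih (a + 1) (by omega) (by omega) (by omega)

-- ===== VERDICT (by name: the statement is the Claim_ definition above) =====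
theorem count_profit_spec : Claim_equal_count_profit := by
  intro n k d _ hk
  unfold Spec_count_profit count_profit count_profit_alt
  have hm : (0 : Int) < |k| := abs_pos.mpr hk
  set m : Int := |k| with hmdef
  set i0 : Int := PySem.Int.mod (-(n * 10)) m with hi0def
  have hi0e : i0 = (-(n * 10)) % m := by rw [hi0def, PySem.Int.mod_eq_emod_of_pos hm]
  have hi0nn : 0 ≤ i0 := by rw [hi0e]; exact Int.emod_nonneg _ (by omega)
  have hi0lt : i0 < m := by rw [hi0e]; exact Int.emod_lt_of_pos _ hm
  have hcond : ∀ i : Int, ((PySem.Int.mod (n * 10 + i) k == 0) = true ↔ m ∣ (n * 10 + i)) := by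
    intro i
    rw [beq_iff_eq, PySem.Int.mod_eq_zero_iff_dvd, hmdef, abs_dvd]
  have hd0 : m ∣ (n * 10 + i0) := by
    refine ⟨-((-(n * 10)) / m), ?_⟩
    have h := Int.emod_add_ediv (-(n * 10)) m
    rw [hi0e]
    linarith [h]
  have hloop := countLoopA_eq n k m i0 hm hi0lt hcond hd0 10 0 (by norm_num) le_rfl hi0nn
  rw [hloop]
  by_cases h10 : i0 < 10
  · rw [if_pos h10]
    simp [if_pos h10]
  · rw [if_neg h10]
    simp [if_neg h10]
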